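-- pv_equiv track=rewrite | github.com/daveschaaf/AdventOfCode | 2024/day04/code04.py | check_m_s_corners
-- ===== SOURCE A (Python) =====
-- def get_data(data,row,col):
--     row_n: int = len(data) - 1
--     col_n: int = len(data[0]) - 1
--     if row < 0 or col < 0:
--         return 0
--     if row > row_n or col > col_n:
--         return 0
--     return data[row][col]
--
-- def check_m_s_corners(data, a_idx):
--     a_row: int = a_idx[0]
--     a_col: int = a_idx[1]
--     mas: int = 0
--     # Key: index offset of M position
--     # Value: index offset of respective S position for opposite corner
--     m_s: dict = {
--         (-1,-1): (1, 1),
--         (-1,1): (1,-1),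
--         (1,-1): (-1,1),
--         (1,1): (-1,-1)
--     }
--     for m_idx, s_idx in m_s.items():
--         m: str = get_data(data,a_row + m_idx[0],a_col + m_idx[1])
--         if m != "M":
--             continue
--         s: str = get_data(data,a_row + s_idx[0],a_col + s_idx[1])
--         if s != "S":
--             continue
--         mas += 1
--     return mas == 2
-- ===== SOURCE B (Python) =====
-- def get_data(data, row, col):
--     row_n: int = len(data) - 1
--     col_n: int = len(data[0]) - 1
--     if row < 0 or col < 0:
--         return 0
--     if row > row_n or col > col_n:
--         return 0
--     return data[row][col]
--
-- def _is_ms(x, y):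
--     return (x, y) in (("M", "S"), ("S", "M"))
--
-- def check_m_s_corners(data, a_idx):
--     r, c = a_idx
--     tl = get_data(data, r - 1, c - 1)
--     tr = get_data(data, r - 1, c + 1)
--     bl = get_data(data, r + 1, c - 1)
--     br = get_data(data, r + 1, c + 1)
--     return _is_ms(tl, br) and _is_ms(tr, bl)
-- ===== Notes on version B (the rewrite author's own statement) =====
-- stated objective: simpler
-- what changed: Replaced the offset-dict loop with a counter and mas==2 test by fetching the four corners once and checking directly that each diagonal is an M/S pair in either order.
import Mathlib
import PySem

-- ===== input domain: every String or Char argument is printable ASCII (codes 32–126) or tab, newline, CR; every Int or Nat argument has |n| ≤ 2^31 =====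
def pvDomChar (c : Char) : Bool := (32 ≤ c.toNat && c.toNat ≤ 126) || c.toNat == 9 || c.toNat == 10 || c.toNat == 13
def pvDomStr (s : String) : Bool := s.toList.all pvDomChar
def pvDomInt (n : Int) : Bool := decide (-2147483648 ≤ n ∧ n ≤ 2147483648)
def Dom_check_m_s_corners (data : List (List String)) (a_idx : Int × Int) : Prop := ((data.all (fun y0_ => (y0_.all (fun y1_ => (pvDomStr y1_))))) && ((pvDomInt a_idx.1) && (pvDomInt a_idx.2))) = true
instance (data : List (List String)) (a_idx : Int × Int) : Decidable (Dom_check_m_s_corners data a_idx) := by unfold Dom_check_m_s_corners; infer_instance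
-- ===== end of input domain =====

-- B replaces A's offset-dict loop and counter with four direct corner fetches and two diagonal M/S-pair checks (objective: simpler).


-- ===== PORT A =====
-- get_data returns 0 (an int, never equal to "M"/"S") out of bounds; we model both
-- that sentinel and the (Pre_-excluded) IndexError on a too-short row as `none`.
def get_data (data : List (List String)) (row col : Int) : Option String :=
  let row_n : Int := (data.length : Int) - 1
  let col_n : Int := ((PySem.List.pyGet? data 0).getD []).length - 1
  if row < 0 ∨ col < 0 then none
  else if row > row_n ∨ col > col_n then none
  else (PySem.List.pyGet? data row).bind (fun r => PySem.List.pyGet? r col)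

def check_m_s_corners (data : List (List String)) (a_idx : Int × Int) : Bool :=
  let a_row : Int := a_idx.1
  let a_col : Int := a_idx.2
  let m_s : List ((Int × Int) × (Int × Int)) :=
    [((-1,-1),(1,1)), ((-1,1),(1,-1)), ((1,-1),(-1,1)), ((1,1),(-1,-1))]
  let mas : Int := m_s.foldl (fun mas p =>
    let m := get_data data (a_row + p.1.1) (a_col + p.1.2)
    if m ≠ some "M" then mas
    else
      let s := get_data data (a_row + p.2.1) (a_col + p.2.2)
      if s ≠ some "S" then mas
      else mas + 1) 0
  mas == 2

-- ===== PORT B =====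
def is_ms (x y : Option String) : Bool :=
  (x = some "M" ∧ y = some "S") ∨ (x = some "S" ∧ y = some "M")

def check_m_s_corners_alt (data : List (List String)) (a_idx : Int × Int) : Bool :=
  let r := a_idx.1
  let c := a_idx.2
  let tl := get_data data (r - 1) (c - 1)
  let tr := get_data data (r - 1) (c + 1)
  let bl := get_data data (r + 1) (c - 1)
  let br := get_data data (r + 1) (c + 1)
  is_ms tl br && is_ms tr bl

-- ===== PRECONDITION & SPEC =====
-- Pre_ excludes exactly the inputs where the Python raises: empty data (len(data[0])
-- is an IndexError) and ragged data where a corner passes the bounds check against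
-- row 0's width but its own row is shorter (data[row][col] IndexError).
def Pre_check_m_s_corners (data : List (List String)) (a_idx : Int × Int) : Prop :=
  data ≠ [] ∧
  ∀ dr ∈ [(-1 : Int), 1], ∀ dc ∈ [(-1 : Int), 1],
    (0 ≤ a_idx.1 + dr ∧ a_idx.1 + dr < (data.length : Int) ∧
     0 ≤ a_idx.2 + dc ∧ a_idx.2 + dc < ((data.headD []).length : Int)) →
    a_idx.2 + dc < (((PySem.List.pyGet? data (a_idx.1 + dr)).getD []).length : Int)
instance (data : List (List String)) (a_idx : Int × Int) : Decidable (Pre_check_m_s_corners data a_idx) := by unfold Pre_check_m_s_corners; infer_instance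

def pvWitness_check_m_s_corners : List (List String) × (Int × Int) :=
  ([["M", "A"], ["X", "S"]], (0, 0))

def Spec_check_m_s_corners (data : List (List String)) (a_idx : Int × Int) (out : Bool) : Prop := out = check_m_s_corners_alt data a_idx
instance (data : List (List String)) (a_idx : Int × Int) (out : Bool) : Decidable (Spec_check_m_s_corners data a_idx out) := by unfold Spec_check_m_s_corners; infer_instance

-- ===== CLAIM (what is proved, stated in full; the proofs are below) =====
def Claim_equal_check_m_s_corners : Prop := ∀ (data : List (List String)) (a_idx : Int × Int), Dom_check_m_s_corners data a_idx → Pre_check_m_s_corners data a_idx → Spec_check_m_s_corners data a_idx (check_m_s_corners data a_idx)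

-- ===== LEMMAS AND PROOFS =====
-- A's counter over the four (M,S) offset pairs reaches 2 exactly when both
-- diagonals are M/S pairs (each diagonal contributes at most one count);
-- proved by exhaustive case analysis on the four corner values.

-- ===== VERDICT (by name: the statement is the Claim_ definition above) =====
theorem check_m_s_corners_spec : Claim_equal_check_m_s_corners := by
  intro data a_idx _ _
  unfold Spec_check_m_s_corners check_m_s_corners check_m_s_corners_alt
  simp only [List.foldl]
  have e1 : a_idx.1 + (-1 : Int) = a_idx.1 - 1 := by ring
  have e2 : a_idx.2 + (-1 : Int) = a_idx.2 - 1 := by ring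
  rw [e1, e2]
  generalize get_data data (a_idx.1 - 1) (a_idx.2 - 1) = tl
  generalize get_data data (a_idx.1 - 1) (a_idx.2 + 1) = tr
  generalize get_data data (a_idx.1 + 1) (a_idx.2 - 1) = bl
  generalize get_data data (a_idx.1 + 1) (a_idx.2 + 1) = br
  simp only [is_ms]
  by_cases h1 : tl = some "M" <;> by_cases h2 : tl = some "S" <;>
  by_cases h3 : tr = some "M" <;> by_cases h4 : tr = some "S" <;>
  by_cases h5 : bl = some "M" <;> by_cases h6 : bl = some "S" <;>
  by_cases h7 : br = some "M" <;> by_cases h8 : br = some "S" <;>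
  simp_all
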